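-- pv_equiv track=rewrite | github.com/melikeakalan/miuul-summer-camp | week-1/exercises/homework_3.py | func
-- ===== SOURCE A (Python) =====
-- def func(my_list):
--     even_list = []
--     odd_list = []
--
--     for item in range(len(my_list)):
--         if item % 2 == 0:
--             even_list.append(item)
--         else:
--             odd_list.append(item)
--     # [even_list.append(i) if i % 2 == 0 else odd_list.append(i) for i in my_list]
--
--     return even_list, odd_list
-- ===== SOURCE B (Python) =====
-- def func(my_list):
--     n = len(my_list)
--     return list(range(0, n, 2)), list(range(1, n, 2))
-- ===== Notes on version B (the rewrite author's own statement) =====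
-- stated objective: idiomatic
-- what changed: Replaces the element-by-element loop with modulo test and branch by a closed-form construction of the two index lists as stepped ranges range(0,n,2) and range(1,n,2).
import Mathlib
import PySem

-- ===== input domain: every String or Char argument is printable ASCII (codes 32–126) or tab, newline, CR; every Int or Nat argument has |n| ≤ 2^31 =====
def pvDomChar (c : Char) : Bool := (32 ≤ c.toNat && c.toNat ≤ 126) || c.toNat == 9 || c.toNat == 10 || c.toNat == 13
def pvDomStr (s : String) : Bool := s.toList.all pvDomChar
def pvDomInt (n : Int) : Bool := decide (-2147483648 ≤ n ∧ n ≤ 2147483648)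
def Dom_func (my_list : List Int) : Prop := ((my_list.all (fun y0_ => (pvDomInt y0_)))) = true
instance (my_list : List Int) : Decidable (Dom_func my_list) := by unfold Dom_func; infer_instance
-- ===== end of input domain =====

-- B replaces A's per-index loop with modulo branch by a closed-form construction of the
-- two index lists as stepped ranges (idiomatic; same O(n) cost).


-- ===== PORT A =====
-- for item in range(len(my_list)): append item to even_list / odd_list by item % 2
def func (my_list : List Int) : List Int × List Int :=
  (PySem.List.pyRange 0 (my_list.length : Int) 1).foldl
    (fun p item =>
      if PySem.Int.mod item 2 == 0 then (p.1 ++ [item], p.2) else (p.1, p.2 ++ [item]))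
    ([], [])

-- ===== PORT B =====
-- n = len(my_list); return list(range(0, n, 2)), list(range(1, n, 2))
def func_alt (my_list : List Int) : List Int × List Int :=
  (PySem.List.pyRange 0 (my_list.length : Int) 2,
   PySem.List.pyRange 1 (my_list.length : Int) 2)

-- ===== PRECONDITION & SPEC =====
def Spec_func (my_list : List Int) (out : List Int × List Int) : Prop := out = func_alt my_list
instance (my_list : List Int) (out : List Int × List Int) : Decidable (Spec_func my_list out) := by unfold Spec_func; infer_instance

-- ===== CLAIM (what is proved, stated in full; the proofs are below) =====
def Claim_equal_func : Prop := ∀ (my_list : List Int), Dom_func my_list → Spec_func my_list (func my_list)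

-- ===== LEMMAS AND PROOFS =====

-- closed Nat forms of the two stepped ranges
lemma pyRange_even (n : Nat) :
    PySem.List.pyRange 0 (n : Int) 2 = (List.range ((n + 1) / 2)).map (fun k : Nat => (2 * (k : Int))) := by
  rw [PySem.List.pyRange_of_pos 0 (n : Int) (by norm_num)]
  have hd : ((n : Int) + 1) / 2 = (((n + 1) / 2 : Nat) : Int) := by
    rw [Int.natCast_div]; push_cast; ring_nf
  have h : (if (0 : Int) < (n : Int) then (((n : Int) - 0 + 2 - 1) / 2).toNat else 0) = (n + 1) / 2 := by
    split_ifs with h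
    · omega
    · omega
  rw [h]
  apply List.map_congr_left; intro k _; ring

lemma pyRange_odd (n : Nat) :
    PySem.List.pyRange 1 (n : Int) 2 = (List.range (n / 2)).map (fun k : Nat => (1 + 2 * (k : Int))) := by
  rw [PySem.List.pyRange_of_pos 1 (n : Int) (by norm_num)]
  have hd : (n : Int) / 2 = ((n / 2 : Nat) : Int) := by rw [Int.natCast_div]; norm_num
  have h : (if (1 : Int) < (n : Int) then (((n : Int) - 1 + 2 - 1) / 2).toNat else 0) = n / 2 := by
    split_ifs with h
    · omega
    · omega
  rw [h]

lemma key (n : Nat) :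
    (PySem.List.pyRange 0 (n : Int) 1).foldl
      (fun p item =>
        if PySem.Int.mod item 2 == 0 then (p.1 ++ [item], p.2) else (p.1, p.2 ++ [item]))
      ([], []) =
    (PySem.List.pyRange 0 (n : Int) 2, PySem.List.pyRange 1 (n : Int) 2) := by
  induction n with
  | zero => decide
  | succ n ih =>
    have hcast : ((n + 1 : Nat) : Int) = (n : Int) + 1 := by push_cast; ring
    rw [hcast, PySem.List.pyRange_one_succ_right (by positivity), List.foldl_append, ih]
    rw [← hcast, pyRange_even n, pyRange_odd n, pyRange_even (n + 1), pyRange_odd (n + 1)]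
    have hmod : PySem.Int.mod (n : Int) 2 = ((n % 2 : Nat) : Int) := by
      simp [PySem.Int.mod, Int.fmod_eq_emod]
    rcases Nat.even_or_odd n with he | ho
    · have h2 : n % 2 = 0 := by rcases he with ⟨m, hm⟩; omega
      simp only [List.foldl, hmod, h2]
      have h3 : (n + 1 + 1) / 2 = (n + 1) / 2 + 1 := by omega
      have h4 : (n + 1) / 2 = n / 2 := by omega
      rw [h3, h4, List.range_succ, List.map_append]
      simp; omega
    · have h2 : n % 2 = 1 := by rcases ho with ⟨m, hm⟩; omega
      simp only [List.foldl, hmod, h2]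
      have h3 : (n + 1 + 1) / 2 = (n + 1) / 2 := by omega
      have h4 : (n + 1) / 2 = n / 2 + 1 := by omega
      rw [h3, h4, List.range_succ, List.map_append]
      simp; omega

-- ===== VERDICT (by name: the statement is the Claim_ definition above) =====
theorem func_spec : Claim_equal_func := by
  intro my_list _
  unfold Spec_func func func_alt
  exact key my_list.length
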